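-- pv_equiv track=rewrite | github.com/bettazzoni/python_code_katas | harrypotter.py | split_into_discount_groups
-- ===== SOURCE A (Python) =====
-- def get_index_of_n_different_books(books, return_exact_length):
--     index_of_books_present = tuple([i for i in range(len(books)) if books[i] > 0])
--     return tuple(index_of_books_present[:return_exact_length]) if len(
--         index_of_books_present) >= return_exact_length else ()
--
-- def extract_discount_group(books, different_books=2):
--     x = list(books)
--     eb = get_index_of_n_different_books(x, different_books)
--     c = 0
--     while eb != ():
--         for i in eb:
--             x[i] -= 1
--         c += different_books
--         eb = get_index_of_n_different_books(x, different_books)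
--     return c, tuple(x)
--
-- def split_into_discount_groups(books):
--     results ={ (sum(books), 0, 0, 0, 0) }
--     discount_group_to_extract = [5, 4, 3, 2]
--     while len(discount_group_to_extract)>0:
--         x = list(books)
--         discount_groups = [0,0,0,0,0]
--         for i in discount_group_to_extract:
--             discount_groups[i-1], x = extract_discount_group(x, i)
--         discount_groups[0] = sum(x)
--         results.add(tuple(discount_groups))
--         discount_group_to_extract = discount_group_to_extract[1:]
--     return results
-- ===== SOURCE B (Python) =====
-- def split_into_discount_groups(books):
--     results = {(sum(books), 0, 0, 0, 0)}
--     for start in (5, 4, 3, 2):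
--         x = list(books)
--         groups = [0, 0, 0, 0, 0]
--         for i in range(start, 1, -1):
--             c = 0
--             while True:
--                 pos = [j for j in range(len(x)) if x[j] > 0]
--                 if len(pos) < i:
--                     break
--                 sel = pos[:i]
--                 m = min(x[j] for j in sel)
--                 for j in sel:
--                     x[j] -= m
--                 c += i * m
--             groups[i - 1] = c
--         groups[0] = sum(x)
--         results.add(tuple(groups))
--     return results
-- ===== Notes on version B (the rewrite author's own statement) =====
-- stated objective: faster
-- what changed: A's extraction loop removes one copy of each selected book per iteration (O(max_count) rounds); B jumps between events by subtracting the minimum of the selected counts in one step, so the number of rounds is bounded by the number of titles instead of the counts.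
import Mathlib
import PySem

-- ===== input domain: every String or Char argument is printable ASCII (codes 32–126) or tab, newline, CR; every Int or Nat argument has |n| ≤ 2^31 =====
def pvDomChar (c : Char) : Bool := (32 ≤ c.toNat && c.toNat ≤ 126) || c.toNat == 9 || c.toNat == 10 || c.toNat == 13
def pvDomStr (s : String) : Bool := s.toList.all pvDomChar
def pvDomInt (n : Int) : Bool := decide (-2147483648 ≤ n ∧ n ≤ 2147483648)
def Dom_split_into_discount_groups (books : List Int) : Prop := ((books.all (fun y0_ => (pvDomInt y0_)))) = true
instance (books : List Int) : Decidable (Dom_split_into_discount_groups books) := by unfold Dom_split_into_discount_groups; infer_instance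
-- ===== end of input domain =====

-- B replaces A's one-decrement-per-round extraction loop by event jumps (subtract the minimum of the
-- selected counts at once), which is asymptotically faster on large counts; the grouping logic is unchanged.

-- measure used by both ports' termination proofs (cited by name in decreasing_by)
def pvPosSum : List Int → Nat
  | [] => 0
  | a :: t => a.toNat + pvPosSum t

theorem pvPosSum_set (x : List Int) (i : Nat) (v : Int) (h : i < x.length) :
    pvPosSum (x.set i v) + (x.getD i 0).toNat = pvPosSum x + v.toNat := by
  induction x generalizing i with
  | nil => simp at h
  | cons a t ih =>
    cases i with
    | zero => simp [pvPosSum]; omega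
    | succ n =>
      simp only [List.length_cons] at h
      simp only [List.set, pvPosSum, List.getD_cons_succ]
      have := ih n (by omega)
      omega

theorem pv_sub_le (m : Int) (hm : 0 ≤ m) :
    ∀ (sel : List Nat) (x : List Int), (∀ j ∈ sel, j < x.length) →
      pvPosSum (sel.foldl (fun a j => a.set j (a.getD j 0 - m)) x) ≤ pvPosSum x := by
  intro sel
  induction sel with
  | nil => intro x _; simp
  | cons j rest ih =>
    intro x hx
    have hj : j < x.length := hx j (by simp)
    have h1 := pvPosSum_set x j (x.getD j 0 - m) hj
    have h2 : ∀ l ∈ rest, l < (x.set j (x.getD j 0 - m)).length := by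
      intro l hl; simpa using hx l (by simp [hl])
    have := ih (x.set j (x.getD j 0 - m)) h2
    simp only [List.foldl_cons]
    omega

theorem pv_sub_lt (m : Int) (hm : 0 < m) (sel : List Nat) (x : List Int)
    (hne : sel ≠ []) (hx : ∀ j ∈ sel, j < x.length ∧ m ≤ x.getD j 0) :
    pvPosSum (sel.foldl (fun a j => a.set j (a.getD j 0 - m)) x) < pvPosSum x := by
  cases sel with
  | nil => exact absurd rfl hne
  | cons j rest =>
    have hj : j < x.length ∧ m ≤ x.getD j 0 := hx j (by simp)
    have h1 := pvPosSum_set x j (x.getD j 0 - m) hj.1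
    have h2 : ∀ l ∈ rest, l < (x.set j (x.getD j 0 - m)).length := by
      intro l hl; simpa using (hx l (by simp [hl])).1
    have h3 := pv_sub_le m (by omega) rest (x.set j (x.getD j 0 - m)) h2
    simp only [List.foldl_cons]
    omega

-- ===== PORT A =====
def pv_get_index (books : List Int) (k : Nat) : List Nat :=
  let idx := (List.range books.length).filter (fun i => decide (0 < books.getD i 0))
  if k ≤ idx.length then idx.take k else []

def pv_dec1 (x : List Int) (eb : List Nat) : List Int :=
  eb.foldl (fun a i => a.set i (a.getD i 0 - 1)) x

theorem pv_extract_term (books : List Int) (k : Nat) (h : ¬ pv_get_index books k = []) :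
    pvPosSum (pv_dec1 books (pv_get_index books k)) < pvPosSum books := by
  apply pv_sub_lt 1 (by omega) _ _ h
  intro j hj
  unfold pv_get_index at hj
  simp only at hj
  split at hj
  · have hj' := List.take_subset _ _ hj
    simp only [List.mem_filter, List.mem_range, decide_eq_true_eq] at hj'
    exact ⟨hj'.1, by omega⟩
  · simp at hj

def pv_extract (books : List Int) (k : Nat) : Int × List Int :=
  if h : pv_get_index books k = [] then (0, books)
  else
    let r := pv_extract (pv_dec1 books (pv_get_index books k)) k
    (r.1 + k, r.2)
termination_by pvPosSum books
decreasing_by exact pv_extract_term books k h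

def pv_runA (books : List Int) (dg : List Nat) : List Int :=
  let st := dg.foldl (fun (st : List Int × List Int) i =>
      let r := pv_extract st.2 i
      (st.1.set (i - 1) r.1, r.2)) ([0, 0, 0, 0, 0], books)
  st.1.set 0 st.2.sum

def pv_loopA (books : List Int) (dg : List Nat) (results : PySem.Set (List Int)) : PySem.Set (List Int) :=
  match dg with
  | [] => results
  | d :: rest => pv_loopA books rest (PySem.Set.add results (pv_runA books (d :: rest)))

def split_into_discount_groups (books : List Int) : List (List Int) :=
  pv_loopA books [5, 4, 3, 2] (PySem.Set.ofList [[books.sum, 0, 0, 0, 0]])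

-- ===== PORT B =====
def pvB_sub (x : List Int) (sel : List Nat) (m : Int) : List Int :=
  sel.foldl (fun a j => a.set j (a.getD j 0 - m)) x

theorem pv_extractF_term (x : List Int) (k : Nat)
    (hm : 0 < (PySem.List.min? ((((List.range x.length).filter (fun i => decide (0 < x.getD i 0))).take k).map
        (fun j => x.getD j 0)) (fun v => v)).getD 0) :
    pvPosSum (pvB_sub x (((List.range x.length).filter (fun i => decide (0 < x.getD i 0))).take k)
        ((PySem.List.min? ((((List.range x.length).filter (fun i => decide (0 < x.getD i 0))).take k).map
          (fun j => x.getD j 0)) (fun v => v)).getD 0)) < pvPosSum x := by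
  set sel := ((List.range x.length).filter (fun i => decide (0 < x.getD i 0))).take k with hsel
  set m := (PySem.List.min? (sel.map (fun j => x.getD j 0)) (fun v => v)).getD 0 with hmdef
  rcases hmin : PySem.List.min? (sel.map (fun j => x.getD j 0)) (fun v => v) with _ | mn
  · rw [hmdef, hmin] at hm; simp at hm
  · have hmval : m = mn := by rw [hmdef, hmin]; rfl
    have hne : sel ≠ [] := by
      intro h; rw [h] at hmin; simp [PySem.List.min?] at hmin
    apply pv_sub_lt m hm sel x hne
    intro j hj
    have hj' := List.take_subset _ _ hj
    simp only [List.mem_filter, List.mem_range, decide_eq_true_eq] at hj'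
    refine ⟨hj'.1, ?_⟩
    have := PySem.List.min?_isMin hmin (x.getD j 0) (List.mem_map_of_mem hj)
    simpa [hmval] using this

def pv_extractF (x : List Int) (k : Nat) : Int × List Int :=
  let pos := (List.range x.length).filter (fun i => decide (0 < x.getD i 0))
  if pos.length < k then (0, x)
  else
    let sel := pos.take k
    let m := (PySem.List.min? (sel.map (fun j => x.getD j 0)) (fun v => v)).getD 0
    if hm : 0 < m then
      let r := pv_extractF (pvB_sub x sel m) k
      (↑k * m + r.1, r.2)
    else (0, x)   -- totality guard only: unreachable for the k ≥ 2 calls B makes (sel is then nonempty)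
termination_by pvPosSum x
decreasing_by exact pv_extractF_term x k hm

def pv_runB (books : List Int) (start : Nat) : List Int :=
  let st := ((List.range' 2 (start - 1)).reverse).foldl
      (fun (st : List Int × List Int) i =>
        let r := pv_extractF st.2 i
        (st.1.set (i - 1) r.1, r.2)) ([0, 0, 0, 0, 0], books)
  st.1.set 0 st.2.sum

def split_into_discount_groups_alt (books : List Int) : List (List Int) :=
  [5, 4, 3, 2].foldl (fun res start => PySem.Set.add res (pv_runB books start))
    (PySem.Set.ofList [[books.sum, 0, 0, 0, 0]])

-- ===== PRECONDITION & SPEC =====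
def Spec_split_into_discount_groups (books : List Int) (out : List (List Int)) : Prop := out = split_into_discount_groups_alt books
instance (books : List Int) (out : List (List Int)) : Decidable (Spec_split_into_discount_groups books out) := by unfold Spec_split_into_discount_groups; infer_instance

-- ===== CLAIM (what is proved, stated in full; the proofs are below) =====
def Claim_equal_split_into_discount_groups : Prop := ∀ (books : List Int), Dom_split_into_discount_groups books → Spec_split_into_discount_groups books (split_into_discount_groups books)

-- ===== LEMMAS AND PROOFS =====
def pvIdx (x : List Int) : List Nat :=
  (List.range x.length).filter (fun i => decide (0 < x.getD i 0))

theorem mem_pvIdx {x : List Int} {i : Nat} : i ∈ pvIdx x ↔ i < x.length ∧ 0 < x.getD i 0 := by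
  simp [pvIdx, List.mem_filter]

theorem nodup_pvIdx (x : List Int) : (pvIdx x).Nodup :=
  (List.nodup_range).filter _

theorem length_pvB_sub (sel : List Nat) (m : Int) : ∀ x : List Int, (pvB_sub x sel m).length = x.length := by
  induction sel with
  | nil => intro x; simp [pvB_sub]
  | cons j rest ih =>
    intro x
    simp only [pvB_sub, List.foldl_cons] at *
    rw [ih]; simp

theorem pv_getD_set (x : List Int) (j : Nat) (v : Int) (i : Nat) (hj : j < x.length) :
    (x.set j v).getD i 0 = if i = j then v else x.getD i 0 := by
  simp only [List.getD_eq_getElem?_getD, List.getElem?_set]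
  split
  · subst ‹j = i›; simp [hj]
  · split
    · omega
    · rfl

theorem getD_pvB_sub (m : Int) : ∀ (sel : List Nat) (x : List Int), sel.Nodup →
    (∀ j ∈ sel, j < x.length) → ∀ i,
    (pvB_sub x sel m).getD i 0 = if i ∈ sel then x.getD i 0 - m else x.getD i 0 := by
  intro sel
  induction sel with
  | nil => intro x _ _ i; simp [pvB_sub]
  | cons j rest ih =>
    intro x hnd hlen i
    have hj : j < x.length := hlen j (by simp)
    have hnd' := hnd
    rw [List.nodup_cons] at hnd'
    have hstep : pvB_sub x (j :: rest) m = pvB_sub (x.set j (x.getD j 0 - m)) rest m := by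
      simp [pvB_sub]
    rw [hstep, ih (x.set j (x.getD j 0 - m)) hnd'.2
        (by intro l hl; simpa using hlen l (by simp [hl])) i]
    by_cases hir : i ∈ rest
    · have hij : i ≠ j := fun h => hnd'.1 (h ▸ hir)
      rw [if_pos hir, if_pos (by simp [hir]), pv_getD_set x j _ i hj, if_neg hij]
    · by_cases hij : i = j
      · subst hij
        rw [if_neg hir, if_pos (by simp), pv_getD_set x i _ i hj, if_pos rfl]
      · rw [if_neg hir, if_neg (by simp [hij, hir]), pv_getD_set x j _ i hj, if_neg hij]

theorem pvIdx_pvB_sub (x : List Int) (sel : List Nat) (m : Int) (hm : 0 ≤ m)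
    (hnd : sel.Nodup) (hlen : ∀ j ∈ sel, j < x.length)
    (hpos : ∀ j ∈ sel, m < x.getD j 0) :
    pvIdx (pvB_sub x sel m) = pvIdx x := by
  unfold pvIdx
  rw [length_pvB_sub]
  apply List.filter_congr
  intro i hi
  rw [getD_pvB_sub m sel x hnd hlen i]
  by_cases h : i ∈ sel
  · rw [if_pos h]
    exact decide_eq_decide.mpr (by have := hpos i h; omega)
  · rw [if_neg h]

theorem pvB_sub_comp (x : List Int) (sel : List Nat) (a b : Int)
    (hnd : sel.Nodup) (hlen : ∀ j ∈ sel, j < x.length) :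
    pvB_sub (pvB_sub x sel a) sel b = pvB_sub x sel (a + b) := by
  have hlen1 : (pvB_sub x sel a).length = x.length := length_pvB_sub sel a x
  have hlen2 : ∀ j ∈ sel, j < (pvB_sub x sel a).length := by rw [hlen1]; exact hlen
  apply List.ext_getElem
  · rw [length_pvB_sub, length_pvB_sub, length_pvB_sub]
  · intro i h1 h2
    have hL : ∀ (y : List Int) (h : i < y.length), y[i] = y.getD i 0 := by
      intro y h; rw [List.getD_eq_getElem y 0 h]
    rw [hL _ h1, hL _ h2]
    rw [getD_pvB_sub b sel _ hnd hlen2 i, getD_pvB_sub a sel x hnd hlen i,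
        getD_pvB_sub (a + b) sel x hnd hlen i]
    by_cases h : i ∈ sel <;> simp [h] <;> ring

theorem pv_get_index_eq (x : List Int) (k : Nat) :
    pv_get_index x k = if k ≤ (pvIdx x).length then (pvIdx x).take k else [] := rfl

theorem pv_dec1_eq (x : List Int) (eb : List Nat) : pv_dec1 x eb = pvB_sub x eb 1 := rfl

theorem sel_nodup (x : List Int) (k : Nat) : ((pvIdx x).take k).Nodup :=
  List.Nodup.sublist (List.take_sublist k (pvIdx x)) (nodup_pvIdx x)

theorem sel_lt (x : List Int) (k : Nat) : ∀ j ∈ (pvIdx x).take k, j < x.length := by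
  intro j hj
  exact (mem_pvIdx.1 (List.take_subset _ _ hj)).1

theorem sel_pos (x : List Int) (k : Nat) : ∀ j ∈ (pvIdx x).take k, 0 < x.getD j 0 := by
  intro j hj
  exact (mem_pvIdx.1 (List.take_subset _ _ hj)).2

theorem pv_extract_unfold (x : List Int) (k : Nat) :
    pv_extract x k =
      if pv_get_index x k = [] then (0, x)
      else ((pv_extract (pv_dec1 x (pv_get_index x k)) k).1 + k,
            (pv_extract (pv_dec1 x (pv_get_index x k)) k).2) := by
  rw [pv_extract]
  split <;> rfl

theorem pv_extractF_unfold (x : List Int) (k : Nat) :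
    pv_extractF x k =
      if (pvIdx x).length < k then (0, x)
      else
        if 0 < (PySem.List.min? (((pvIdx x).take k).map (fun j => x.getD j 0)) (fun v => v)).getD 0 then
          (↑k * (PySem.List.min? (((pvIdx x).take k).map (fun j => x.getD j 0)) (fun v => v)).getD 0 +
             (pv_extractF (pvB_sub x ((pvIdx x).take k)
               ((PySem.List.min? (((pvIdx x).take k).map (fun j => x.getD j 0)) (fun v => v)).getD 0)) k).1,
           (pv_extractF (pvB_sub x ((pvIdx x).take k)
               ((PySem.List.min? (((pvIdx x).take k).map (fun j => x.getD j 0)) (fun v => v)).getD 0)) k).2)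
        else (0, x) := by
  rw [pv_extractF]
  rfl

theorem pv_chunk (k : Nat) (hk : 0 < k) : ∀ (n : Nat) (x : List Int),
    k ≤ (pvIdx x).length →
    (∀ j ∈ (pvIdx x).take k, ((n : Int) + 1) ≤ x.getD j 0) →
    pv_extract x k =
      ((pv_extract (pvB_sub x ((pvIdx x).take k) ((n : Int) + 1)) k).1 + k * ((n : Int) + 1),
       (pv_extract (pvB_sub x ((pvIdx x).take k) ((n : Int) + 1)) k).2) := by
  intro n
  induction n with
  | zero =>
    intro x h1 _
    have hne : pv_get_index x k ≠ [] := by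
      rw [pv_get_index_eq, if_pos h1]
      have : ((pvIdx x).take k).length = k := by simp [List.length_take]; omega
      intro hnil
      rw [hnil] at this
      simp at this
      omega
    rw [pv_extract_unfold, if_neg hne, pv_get_index_eq, if_pos h1, pv_dec1_eq]
    norm_num
  | succ n IH =>
    intro x h1 hbound
    have hnd := sel_nodup x k
    have hlt := sel_lt x k
    have hne : pv_get_index x k ≠ [] := by
      rw [pv_get_index_eq, if_pos h1]
      have : ((pvIdx x).take k).length = k := by simp [List.length_take]; omega
      intro hnil
      rw [hnil] at this
      simp at this
      omega
    have hpos1 : ∀ j ∈ (pvIdx x).take k, (1 : Int) < x.getD j 0 := by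
      intro j hj
      have := hbound j hj
      push_cast at this
      omega
    have hidx : pvIdx (pvB_sub x ((pvIdx x).take k) 1) = pvIdx x :=
      pvIdx_pvB_sub x _ 1 (by norm_num) hnd hlt hpos1
    have h1' : k ≤ (pvIdx (pvB_sub x ((pvIdx x).take k) 1)).length := by rw [hidx]; exact h1
    have hb1 : ∀ j ∈ (pvIdx (pvB_sub x ((pvIdx x).take k) 1)).take k,
        ((n : Int) + 1) ≤ (pvB_sub x ((pvIdx x).take k) 1).getD j 0 := by
      rw [hidx]
      intro j hj
      rw [getD_pvB_sub 1 _ x hnd hlt j, if_pos hj]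
      have := hbound j hj
      push_cast at this
      omega
    have hIH := IH (pvB_sub x ((pvIdx x).take k) 1) h1' hb1
    rw [hidx] at hIH
    have hcomp : pvB_sub (pvB_sub x ((pvIdx x).take k) 1) ((pvIdx x).take k) ((n : Int) + 1)
        = pvB_sub x ((pvIdx x).take k) ((↑(n + 1) : Int) + 1) := by
      rw [pvB_sub_comp x _ 1 ((n : Int) + 1) hnd hlt]
      push_cast
      ring_nf
    rw [hcomp] at hIH
    rw [pv_extract_unfold, if_neg hne, pv_get_index_eq, if_pos h1, pv_dec1_eq, hIH]
    rw [Prod.mk.injEq]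
    refine ⟨by push_cast; ring, rfl⟩

theorem pv_extractF_eq (k : Nat) (x : List Int) : pv_extractF x k = pv_extract x k := by
  have main : ∀ N x, pvPosSum x < N → pv_extractF x k = pv_extract x k := by
    intro N
    induction N with
    | zero => intro x h; omega
    | succ N ih =>
      intro x hlt
      rw [pv_extractF_unfold]
      by_cases hl : (pvIdx x).length < k
      · have hnil : pv_get_index x k = [] := by
          rw [pv_get_index_eq, if_neg (by omega)]
        rw [if_pos hl, pv_extract_unfold, if_pos hnil]
      · rw [if_neg hl]
        set sel := (pvIdx x).take k with hseldef
        set m := (PySem.List.min? (sel.map (fun j => x.getD j 0)) (fun v => v)).getD 0 with hmdef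
        by_cases hm : 0 < m
        · rw [if_pos hm]
          have hkle : k ≤ (pvIdx x).length := by omega
          have hlensel : sel.length = k := by rw [hseldef]; simp [List.length_take]; omega
          have hselne : sel ≠ [] := by
            intro h
            rw [h] at hmdef
            simp [PySem.List.min?] at hmdef
            omega
          have hk0 : 0 < k := by rw [← hlensel]; exact List.length_pos_of_ne_nil hselne
          obtain ⟨mn, hmin⟩ : ∃ mn, PySem.List.min? (sel.map (fun j => x.getD j 0)) (fun v => v) = some mn := by
            cases h : PySem.List.min? (sel.map (fun j => x.getD j 0)) (fun v => v) with
            | none =>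
              rw [PySem.List.min?_eq_none_iff] at h
              simp at h
              exact absurd h hselne
            | some mn => exact ⟨mn, rfl⟩
          have hmeq : m = mn := by rw [hmdef, hmin]; rfl
          have hbound : ∀ j ∈ sel, m ≤ x.getD j 0 := by
            intro j hj
            have := PySem.List.min?_isMin hmin (x.getD j 0) (List.mem_map_of_mem hj)
            simpa [hmeq] using this
          have hcast : (((m - 1).toNat : Int) + 1) = m := by omega
          have hchunk := pv_chunk k hk0 (m - 1).toNat x hkle
            (by intro j hj; rw [hcast]; exact hbound j (hseldef ▸ hj))
          rw [hcast] at hchunk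
          rw [← hseldef] at hchunk
          rw [hchunk]
          have hdec : pvPosSum (pvB_sub x sel m) < pvPosSum x := by
            apply pv_sub_lt m hm sel x hselne
            intro j hj
            exact ⟨sel_lt x k j (hseldef ▸ hj), hbound j hj⟩
          rw [ih (pvB_sub x sel m) (by omega)]
          rw [Prod.mk.injEq]
          exact ⟨by ring, rfl⟩
        · rw [if_neg hm]
          have hselnil : sel = [] := by
            by_contra h
            obtain ⟨j, hj⟩ := List.exists_mem_of_ne_nil sel h
            have hmem : x.getD j 0 ∈ sel.map (fun j => x.getD j 0) := List.mem_map_of_mem hj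
            cases hmin : PySem.List.min? (sel.map (fun j => x.getD j 0)) (fun v => v) with
            | none =>
              rw [PySem.List.min?_eq_none_iff] at hmin
              simp at hmin
              exact h hmin
            | some mn =>
              have h1 := PySem.List.min?_isMin hmin (x.getD j 0) hmem
              have h2 : 0 < x.getD j 0 := sel_pos x k j (hseldef ▸ hj)
              have h3 : mn ∈ sel.map (fun j => x.getD j 0) := PySem.List.min?_mem hmin
              obtain ⟨j', hj', hj'eq⟩ := List.mem_map.1 h3
              have h4 : 0 < mn := hj'eq ▸ sel_pos x k j' (hseldef ▸ hj')
              have : m = mn := by rw [hmdef, hmin]; rfl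
              omega
          have hk0 : k = 0 := by
            have hlensel : sel.length = min k (pvIdx x).length := by rw [hseldef]; simp [List.length_take]
            rw [hselnil] at hlensel
            simp at hlensel
            omega
          subst hk0
          have hnil : pv_get_index x 0 = [] := by
            rw [pv_get_index_eq, if_pos (Nat.zero_le _), List.take_zero]
          rw [pv_extract_unfold, hnil, if_pos rfl]
  exact main (pvPosSum x + 1) x (by omega)

theorem pv_runB_eq (books : List Int) (start : Nat) :
    pv_runB books start = pv_runA books ((List.range' 2 (start - 1)).reverse) := by
  unfold pv_runB pv_runA
  simp only [pv_extractF_eq]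

-- ===== VERDICT (by name: the statement is the Claim_ definition above) =====
theorem split_into_discount_groups_spec : Claim_equal_split_into_discount_groups := by
  intro books _
  unfold Spec_split_into_discount_groups split_into_discount_groups split_into_discount_groups_alt
  simp only [List.foldl_cons, List.foldl_nil, pv_runB_eq]
  norm_num [List.range']
  rfl
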